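-- pv_equiv track=rewrite | github.com/Judongsung/algorithm | 백준/Gold/1759. 암호 만들기/암호 만들기.py | get_pws
-- ===== SOURCE A (Python) =====
-- def get_pws(remain_consonants, remain_vowels, count, cur_str='', used_cons=0, used_vowel=0):
--     result = []
--     if count == 0:
--         if used_cons >= 2 and used_vowel >= 1:
--             result = [cur_str]
--         return result
--
--     last_ch = cur_str[-1] if cur_str else ''
--
--     for i, cons in enumerate(remain_consonants):
--         if last_ch < cons:
--             result += get_pws(remain_consonants[i+1:], remain_vowels, count-1, cur_str+cons, used_cons+1, used_vowel)
--     for i, vowel in enumerate(remain_vowels):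
--         if last_ch < vowel:
--             result += get_pws(remain_consonants, remain_vowels[i+1:], count-1, cur_str+vowel, used_cons, used_vowel+1)
--
--     return result
-- ===== SOURCE B (Python) =====
-- # Iterative level-by-level (BFS) worklist instead of recursion: since every result
-- # is emitted at depth exactly `count`, the frontier order at the last level equals
-- # A's DFS emission order.
-- def _expand(state):
--     rc, rv, cur, uc, uv = state
--     last = cur[-1] if cur else ''
--     return [(rc[i + 1:], rv, cur + c, uc + 1, uv) for i, c in enumerate(rc) if last < c] + \
--            [(rc, rv[i + 1:], cur + v, uc, uv + 1) for i, v in enumerate(rv) if last < v]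
--
--
-- def get_pws(remain_consonants, remain_vowels, count, cur_str='', used_cons=0, used_vowel=0):
--     frontier = [(remain_consonants, remain_vowels, cur_str, used_cons, used_vowel)]
--     while frontier and count != 0:
--         frontier = [child for state in frontier for child in _expand(state)]
--         count -= 1
--     if count != 0:
--         return []
--     return [cur for (_, _, cur, uc, uv) in frontier if uc >= 2 and uv >= 1]
-- ===== Notes on version B (the rewrite author's own statement) =====
-- stated objective: alternative
-- what changed: Replaces A's recursion with an iterative level-by-level worklist: a frontier of partial states is expanded once per unit of count, and the final frontier (whose left-to-right order equals A's DFS emission order, since all results sit at the same depth) is filtered for the consonant/vowel constraints.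
import Mathlib
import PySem

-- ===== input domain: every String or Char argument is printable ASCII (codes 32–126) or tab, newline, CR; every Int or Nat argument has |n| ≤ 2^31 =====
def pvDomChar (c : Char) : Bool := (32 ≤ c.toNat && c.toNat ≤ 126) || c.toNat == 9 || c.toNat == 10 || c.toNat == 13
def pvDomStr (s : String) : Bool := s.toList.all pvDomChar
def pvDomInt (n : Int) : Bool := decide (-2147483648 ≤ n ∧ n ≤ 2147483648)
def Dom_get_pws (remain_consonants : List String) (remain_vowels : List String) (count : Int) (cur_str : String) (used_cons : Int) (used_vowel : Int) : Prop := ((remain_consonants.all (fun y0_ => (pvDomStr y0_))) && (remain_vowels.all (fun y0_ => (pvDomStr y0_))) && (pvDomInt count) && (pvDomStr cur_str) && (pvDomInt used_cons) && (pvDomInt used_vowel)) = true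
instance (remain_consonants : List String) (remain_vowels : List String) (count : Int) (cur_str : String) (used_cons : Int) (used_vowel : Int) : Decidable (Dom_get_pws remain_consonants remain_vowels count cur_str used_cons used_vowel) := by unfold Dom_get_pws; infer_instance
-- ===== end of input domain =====

-- B replaces A's recursion by an iterative level-by-level worklist (all results sit at
-- the same depth, so the frontier order at the last level equals A's DFS emission order);
-- same output, same cost (objective: alternative).


-- ===== PORT A =====

-- "cur_str[-1] if cur_str else ''" — Python s[-1] on a nonempty string is its last code
-- point as a one-character string; exact via PySem.Str.pyGet? (both Pythons contain this
-- same expression, so both ports use this helper).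
def pvLast (s : String) : String :=
  if s = "" then ""
  else match PySem.Str.pyGet? s (-1) with
       | some c => String.ofList [c]
       | none => ""

-- length of "xs[i+1:]" for an enumerate index i < len xs (used only for termination)
theorem pv_slice_succ_len {α : Type} (xs : List α) (k : Nat) (_hk : k < xs.length) :
    (PySem.List.slice xs (some ((k : Int) + 1)) none).length = xs.length - (k + 1) := by
  have h1 : ((k : Int) + 1) = ((k + 1 : Nat) : Int) := by push_cast; ring
  rw [h1, PySem.List.slice_from_natCast, List.length_drop]

-- literal transliteration of A: two enumerate-loops accumulating `result` by `+=`,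
-- recursion on the sliced remainder lists (the slice is PySem.List.slice, the loops foldl
-- over the attached enumerate list — the attachment only carries the termination proof)
def get_pws (remain_consonants : List String) (remain_vowels : List String) (count : Int) (cur_str : String) (used_cons : Int) (used_vowel : Int) : List String :=
  if count = 0 then
    (if 2 ≤ used_cons ∧ 1 ≤ used_vowel then [cur_str] else [])
  else
    let last_ch := pvLast cur_str
    let r1 := (PySem.List.enumerate remain_consonants).attach.foldl
      (fun acc x =>
        if last_ch < x.1.2 then
          acc ++ get_pws (PySem.List.slice remain_consonants (some (x.1.1 + 1)) none)
                   remain_vowels (count - 1) (cur_str ++ x.1.2) (used_cons + 1) used_vowel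
        else acc) []
    (PySem.List.enumerate remain_vowels).attach.foldl
      (fun acc x =>
        if last_ch < x.1.2 then
          acc ++ get_pws remain_consonants (PySem.List.slice remain_vowels (some (x.1.1 + 1)) none)
                   (count - 1) (cur_str ++ x.1.2) used_cons (used_vowel + 1)
        else acc) r1
termination_by remain_consonants.length + remain_vowels.length
decreasing_by
  · rcases (PySem.List.mem_enumerate_iff _ _ _).1 x.2 with ⟨k, hk, hx⟩
    have h1 : x.1.1 = (k : Int) := by rw [hx]; simp
    rw [h1, pv_slice_succ_len _ k hk]
    omega
  · rcases (PySem.List.mem_enumerate_iff _ _ _).1 x.2 with ⟨k, hk, hx⟩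
    have h1 : x.1.1 = (k : Int) := by rw [hx]; simp
    rw [h1, pv_slice_succ_len _ k hk]
    omega

-- ===== PORT B =====

-- a worklist state: (remain_consonants, remain_vowels, cur_str, used_cons, used_vowel)
abbrev pvSt : Type := List String × List String × String × Int × Int

-- Source B's _expand: the two list comprehensions, consonant children then vowel children
def pvExpand (s : pvSt) : List pvSt :=
  let last := pvLast s.2.2.1
  ((PySem.List.enumerate s.1).filterMap (fun p =>
      if last < p.2 then
        some (PySem.List.slice s.1 (some (p.1 + 1)) none, s.2.1, s.2.2.1 ++ p.2, s.2.2.2.1 + 1, s.2.2.2.2)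
      else none))
  ++ ((PySem.List.enumerate s.2.1).filterMap (fun p =>
      if last < p.2 then
        some (s.1, PySem.List.slice s.2.1 (some (p.1 + 1)) none, s.2.2.1 ++ p.2, s.2.2.2.1, s.2.2.2.2 + 1)
      else none))

-- remaining material of a state / of a frontier; pvMu is the while-loop's termination measure
def pvTot (s : pvSt) : Nat := s.1.length + s.2.1.length
def pvMax (f : List pvSt) : Nat := (f.map pvTot).foldr max 0
def pvMu (f : List pvSt) : Nat := if f = [] then 0 else pvMax f + 1

theorem pv_tot_lt_of_mem_expand (s : pvSt) : ∀ s' ∈ pvExpand s, pvTot s' < pvTot s := by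
  intro s' hs'
  rcases List.mem_append.1 hs' with h | h <;>
  · rcases List.mem_filterMap.1 h with ⟨p, hp, heq⟩
    rcases (PySem.List.mem_enumerate_iff _ _ _).1 hp with ⟨k, hk, rfl⟩
    split at heq
    · injection heq with heq'
      subst heq'
      simp only [pvTot, zero_add]
      rw [pv_slice_succ_len _ k hk]
      omega
    · cases heq

theorem pv_tot_le_max (f : List pvSt) : ∀ s ∈ f, pvTot s ≤ pvMax f := by
  intro s hs
  induction f with
  | nil => simp at hs
  | cons a t ih =>
    rcases List.mem_cons.1 hs with h | h
    · subst h; simp only [pvMax, List.map_cons, List.foldr_cons]; omega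
    · have h2 := ih h; simp only [pvMax, List.map_cons, List.foldr_cons] at h2 ⊢; omega

theorem pv_max_lt (f : List pvSt) (b : Nat) (hne : f ≠ []) (h : ∀ s ∈ f, pvTot s < b) :
    pvMax f < b := by
  induction f with
  | nil => exact absurd rfl hne
  | cons a t ih =>
    have ha := h a (List.mem_cons_self)
    rcases eq_or_ne t [] with ht | ht
    · subst ht; simpa [pvMax] using ha
    · have := ih ht (fun s hs => h s (List.mem_cons_of_mem _ hs))
      simp [pvMax] at this ⊢
      omega

theorem pv_mu_dec (f : List pvSt) (hne : f ≠ []) : pvMu (f.flatMap pvExpand) < pvMu f := by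
  rcases eq_or_ne (f.flatMap pvExpand) [] with h | h
  · simp [pvMu, h, hne]
  · have hlt : ∀ s' ∈ f.flatMap pvExpand, pvTot s' < pvMax f := by
      intro s' hs'
      rcases List.mem_flatMap.1 hs' with ⟨p, hp, hmem⟩
      exact lt_of_lt_of_le (pv_tot_lt_of_mem_expand p s' hmem) (pv_tot_le_max f p hp)
    have hm := pv_max_lt _ _ h hlt
    simp [pvMu, h, hne]
    omega

-- Source B's while-loop: expand the whole frontier once per unit of count, then filter
def pvBfs (count : Int) (frontier : List pvSt) : List String :=
  if frontier = [] then
    (if count = 0 then frontier.filterMap (fun s => if 2 ≤ s.2.2.2.1 ∧ 1 ≤ s.2.2.2.2 then some s.2.2.1 else none) else [])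
  else if count = 0 then
    frontier.filterMap (fun s => if 2 ≤ s.2.2.2.1 ∧ 1 ≤ s.2.2.2.2 then some s.2.2.1 else none)
  else
    pvBfs (count - 1) (frontier.flatMap pvExpand)
termination_by pvMu frontier
decreasing_by
  have h := pv_mu_dec frontier (by assumption)
  simpa using h

def get_pws_alt (remain_consonants : List String) (remain_vowels : List String) (count : Int) (cur_str : String) (used_cons : Int) (used_vowel : Int) : List String :=
  pvBfs count [(remain_consonants, remain_vowels, cur_str, used_cons, used_vowel)]

-- ===== PRECONDITION & SPEC =====
def Spec_get_pws (remain_consonants : List String) (remain_vowels : List String) (count : Int) (cur_str : String) (used_cons : Int) (used_vowel : Int) (out : List String) : Prop := out = get_pws_alt remain_consonants remain_vowels count cur_str used_cons used_vowel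
instance (remain_consonants : List String) (remain_vowels : List String) (count : Int) (cur_str : String) (used_cons : Int) (used_vowel : Int) (out : List String) : Decidable (Spec_get_pws remain_consonants remain_vowels count cur_str used_cons used_vowel out) := by unfold Spec_get_pws; infer_instance

-- ===== CLAIM (what is proved, stated in full; the proofs are below) =====
def Claim_equal_get_pws : Prop := ∀ (remain_consonants : List String) (remain_vowels : List String) (count : Int) (cur_str : String) (used_cons : Int) (used_vowel : Int), Dom_get_pws remain_consonants remain_vowels count cur_str used_cons used_vowel → Spec_get_pws remain_consonants remain_vowels count cur_str used_cons used_vowel (get_pws remain_consonants remain_vowels count cur_str used_cons used_vowel)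

-- ===== LEMMAS AND PROOFS =====

-- evaluate A on a state
def pvA (count : Int) (s : pvSt) : List String :=
  get_pws s.1 s.2.1 count s.2.2.1 s.2.2.2.1 s.2.2.2.2

-- flatMap of a guarded singleton is filterMap (the count = 0 level)
theorem pv_flatMap_if_singleton {α β : Type} (l : List α) (C : α → Prop) [DecidablePred C] (v : α → β) :
    l.flatMap (fun s => if C s then [v s] else []) =
      l.filterMap (fun s => if C s then some (v s) else none) := by
  induction l with
  | nil => rfl
  | cons a t ih => by_cases h : C a <;> simp [h, ih]

-- flatMap after a guarded filterMap
theorem pv_flatMap_filterMap {α β γ : Type} (l : List α) (C : α → Prop) [DecidablePred C]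
    (c : α → β) (g : β → List γ) :
    (l.filterMap (fun x => if C x then some (c x) else none)).flatMap g =
      l.flatMap (fun x => if C x then g (c x) else []) := by
  induction l with
  | nil => rfl
  | cons a t ih => by_cases h : C a <;> simp [h, ih]

-- a guarded "result += recursive call" foldl over an attached list is a guarded flatMap
theorem pv_foldl_shape {α : Type} (l : List α) (p : α → Prop) [DecidablePred p]
    (g : α → List String) (init : List String) :
    l.attach.foldl (fun acc x => if p x.1 then acc ++ g x.1 else acc) init
      = init ++ (l.flatMap (fun x => if p x then g x else [])) := by
  rw [List.foldl_attach (f := fun acc y => if p y then acc ++ g y else acc)]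
  have h : (fun (acc : List String) x => if p x then acc ++ g x else acc)
      = (fun acc x => acc ++ (if p x then g x else [])) := by
    funext acc x; split <;> simp
  rw [h, PySem.List.foldl_append_eq_flatMap]

-- one level of A's recursion = expand then recurse at count - 1
theorem pvA_step (count : Int) (hc : count ≠ 0) (s : pvSt) :
    pvA count s = (pvExpand s).flatMap (pvA (count - 1)) := by
  obtain ⟨rc, rv, cur, uc, uv⟩ := s
  show get_pws rc rv count cur uc uv = _
  rw [get_pws]
  simp only [if_neg hc]
  rw [pv_foldl_shape (PySem.List.enumerate rc) (fun y => pvLast cur < y.2)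
        (fun y => get_pws (PySem.List.slice rc (some (y.1 + 1)) none) rv (count - 1) (cur ++ y.2) (uc + 1) uv) [],
      pv_foldl_shape (PySem.List.enumerate rv) (fun y => pvLast cur < y.2)
        (fun y => get_pws rc (PySem.List.slice rv (some (y.1 + 1)) none) (count - 1) (cur ++ y.2) uc (uv + 1)) _]
  simp only [List.nil_append]
  show _ = (pvExpand (rc, rv, cur, uc, uv)).flatMap (pvA (count - 1))
  rw [pvExpand]
  simp only [List.flatMap_append]
  rw [pv_flatMap_filterMap (PySem.List.enumerate rc) (fun p => pvLast cur < p.2) _ (pvA (count - 1)),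
      pv_flatMap_filterMap (PySem.List.enumerate rv) (fun p => pvLast cur < p.2) _ (pvA (count - 1))]
  rfl

-- the worklist computes the concatenation of A over the frontier
theorem pvBfs_eq (count : Int) (frontier : List pvSt) :
    pvBfs count frontier = frontier.flatMap (pvA count) := by
  induction count, frontier using pvBfs.induct with
  | case1 =>
    rw [pvBfs]
    simp
  | case2 count hc =>
    rw [pvBfs]
    simp
  | case3 frontier hne =>
    rw [pvBfs]
    simp only [if_neg hne, if_true]
    have hA : pvA 0 = (fun s : pvSt => if 2 ≤ s.2.2.2.1 ∧ 1 ≤ s.2.2.2.2 then [s.2.2.1] else []) := by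
      funext s
      show get_pws s.1 s.2.1 0 s.2.2.1 s.2.2.2.1 s.2.2.2.2 = _
      rw [get_pws]
      simp
    rw [hA, pv_flatMap_if_singleton]
  | case4 count frontier hne hc ih =>
    simp only [List.flatMap, List.map_subtype, List.unattach_attach] at ih
    simp only [← List.flatMap_def] at ih
    rw [pvBfs]
    simp only [if_neg hne, if_neg hc]
    rw [ih, List.flatMap_assoc]
    have h : (fun x => (pvExpand x).flatMap (pvA (count - 1))) = pvA count := by
      funext s; exact (pvA_step count hc s).symm
    rw [h]

-- ===== VERDICT (by name: the statement is the Claim_ definition above) =====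
theorem get_pws_spec : Claim_equal_get_pws := by
  intro rc rv count cur uc uv _
  unfold Spec_get_pws get_pws_alt
  rw [pvBfs_eq]
  simp [pvA]
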